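-- pv_equiv track=rewrite | github.com/biovino1/GlycN | scripts/parse_swissprot.py | check_locs
-- ===== SOURCE A (Python) =====
-- def check_locs(row: list) -> tuple:
--     """Checks a row from csv file to see if it is a nuclear or mitochondrial protein
--
--     :param row: row from csv in a list
--     :return: tuple of (mito, nuclear) where mito and nuclear are booleans
--     """
--
--     mito, nuclear = False, False
--     for i, index in enumerate(row[4:15]):
--         if index == '1.0':
--             if i not in [2, 5]:  # If in any other index, doesn't count
--                 mito, nuclear = False, False
--                 break
--             if i == 2:  # mt index
--                 mito = True
--             if i == 5:  # nucleus index
--                 nuclear = True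
--
--     return mito, nuclear
-- ===== SOURCE B (Python) =====
-- def check_locs(row: list) -> tuple:
--     """Checks a row from csv file to see if it is a nuclear or mitochondrial protein
--
--     :param row: row from csv in a list
--     :return: tuple of (mito, nuclear) where mito and nuclear are booleans
--     """
--     flags = {i for i, v in enumerate(row[4:15]) if v == '1.0'}
--     if flags <= {2, 5}:
--         return 2 in flags, 5 in flags
--     return False, False
-- ===== Notes on version B (the rewrite author's own statement) =====
-- stated objective: simpler
-- what changed: Replaces the interleaved scan with mutable flags, reset and early break by one pass building the set of positions flagged '1.0' in row[4:15] followed by a subset test against {2, 5}.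
import Mathlib
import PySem

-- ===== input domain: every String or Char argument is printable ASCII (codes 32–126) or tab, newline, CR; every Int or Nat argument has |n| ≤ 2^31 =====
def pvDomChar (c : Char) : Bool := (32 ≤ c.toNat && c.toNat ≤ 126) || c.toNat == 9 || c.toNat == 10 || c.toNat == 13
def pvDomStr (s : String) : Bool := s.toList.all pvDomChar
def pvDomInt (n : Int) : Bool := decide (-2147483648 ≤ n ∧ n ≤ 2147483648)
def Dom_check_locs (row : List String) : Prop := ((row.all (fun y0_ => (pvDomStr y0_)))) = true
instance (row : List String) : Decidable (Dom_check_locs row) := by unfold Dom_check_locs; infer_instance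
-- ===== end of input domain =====

-- B replaces A's interleaved scan with mutable flags, reset and early break by one pass
-- collecting the set of positions flagged '1.0', then a subset test against {2, 5} (simpler).


-- ===== PORT A =====
-- loop 'for i, index in enumerate(row[4:15])' with state (mito, nuclear) and early break
def check_locs_go : List (Int × String) → Bool → Bool → Bool × Bool
  | [], mito, nuclear => (mito, nuclear)
  | (i, index) :: rest, mito, nuclear =>
    if index == "1.0" then
      if ¬ (i = 2 ∨ i = 5) then (false, false)   -- reset and break
      else
        check_locs_go rest (if i == 2 then true else mito) (if i == 5 then true else nuclear)
    else check_locs_go rest mito nuclear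

def check_locs (row : List String) : Bool × Bool :=
  check_locs_go (PySem.List.enumerate (PySem.List.slice row (some 4) (some 15))) false false

-- ===== PORT B =====
def check_locs_alt (row : List String) : Bool × Bool :=
  let flags : PySem.Set Int :=
    PySem.Set.ofList
      (((PySem.List.enumerate (PySem.List.slice row (some 4) (some 15))).filter
          (fun p => p.2 == "1.0")).map (·.1))
  if PySem.Set.issubset flags (PySem.Set.ofList [2, 5]) then
    (PySem.Set.contains flags 2, PySem.Set.contains flags 5)
  else (false, false)

-- ===== PRECONDITION & SPEC =====
def Spec_check_locs (row : List String) (out : Bool × Bool) : Prop := out = check_locs_alt row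
instance (row : List String) (out : Bool × Bool) : Decidable (Spec_check_locs row out) := by unfold Spec_check_locs; infer_instance

-- ===== CLAIM (what is proved, stated in full; the proofs are below) =====
def Claim_equal_check_locs : Prop := ∀ (row : List String), Dom_check_locs row → Spec_check_locs row (check_locs row)

-- ===== LEMMAS AND PROOFS =====

-- A's loop, characterised: (false,false) as soon as some position other than 2/5 is flagged,
-- otherwise the accumulators or-ed with whether positions 2 and 5 are flagged.
theorem check_locs_go_eq (l : List (Int × String)) (m n : Bool) :
    check_locs_go l m n =
      if l.all (fun p => !(p.2 == "1.0") || p.1 == 2 || p.1 == 5) then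
        (m || l.any (fun p => p.1 == 2 && p.2 == "1.0"),
         n || l.any (fun p => p.1 == 5 && p.2 == "1.0"))
      else (false, false) := by
  induction l generalizing m n with
  | nil => simp [check_locs_go]
  | cons p rest ih =>
    obtain ⟨i, v⟩ := p
    by_cases hv : v = "1.0"
    · by_cases h2 : i = 2
      · subst hv h2
        have hstep : check_locs_go ((2, "1.0") :: rest) m n = check_locs_go rest true n := by
          simp [check_locs_go]
        rw [hstep, ih]
        simp only [List.all_cons, List.any_cons, beq_self_eq_true, Bool.not_true,
          Bool.false_or, Bool.true_or, Bool.or_true, Bool.true_and,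
          Bool.false_and, Int.reduceBEq]
      · by_cases h5 : i = 5
        · subst hv h5
          have hstep : check_locs_go ((5, "1.0") :: rest) m n = check_locs_go rest m true := by
            simp [check_locs_go]
          rw [hstep, ih]
          simp only [List.all_cons, List.any_cons, beq_self_eq_true, Bool.not_true,
            Bool.false_or, Bool.true_or, Bool.or_true, Bool.true_and,
            Bool.false_and, Int.reduceBEq]
        · simp [check_locs_go, hv, h2, h5]
    · have hb : (v == "1.0") = false := by simp [hv]
      have hstep : check_locs_go ((i, v) :: rest) m n = check_locs_go rest m n := by
        simp [check_locs_go, hb]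
      rw [hstep, ih]
      simp only [List.all_cons, List.any_cons, hb, Bool.not_false, Bool.true_or,
        Bool.true_and, Bool.and_false, Bool.false_or]

-- membership in B's set of flagged positions, as an 'any' over the enumerated slice
theorem flags_mem (l : List (Int × String)) (i : Int) :
    (i ∈ PySem.Set.ofList ((l.filter (fun p => p.2 == "1.0")).map (·.1))) ↔
      l.any (fun p => p.1 == i && p.2 == "1.0") = true := by
  simp [PySem.Set.mem_ofList, List.mem_map, List.mem_filter, List.any_eq_true]

-- B's subset test is exactly A's "no other position is flagged" condition
theorem flags_subset (l : List (Int × String)) :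
    PySem.Set.issubset
        (PySem.Set.ofList ((l.filter (fun p => p.2 == "1.0")).map (·.1)))
        (PySem.Set.ofList [2, 5]) = true ↔
      l.all (fun p => !(p.2 == "1.0") || p.1 == 2 || p.1 == 5) = true := by
  rw [PySem.Set.issubset_iff]
  simp only [PySem.Set.mem_ofList, List.mem_map, List.mem_filter, List.all_eq_true,
    List.mem_cons]
  constructor
  · intro h p hp
    by_cases hv : (p.2 == "1.0") = true
    · rcases h p.1 ⟨p, ⟨hp, hv⟩, rfl⟩ with h2 | h5 | hF
      · simp [h2]
      · simp [h5]
      · exact absurd hF (List.not_mem_nil)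
    · simp [hv]
  · rintro h x ⟨p, ⟨hp, hv⟩, rfl⟩
    have := h p hp
    simp only [hv, Bool.not_true, Bool.false_or, Bool.or_eq_true, beq_iff_eq] at this
    exact this.imp_right Or.inl

-- ===== VERDICT (by name: the statement is the Claim_ definition above) =====
theorem check_locs_spec : Claim_equal_check_locs := by
  intro row _
  unfold Spec_check_locs check_locs check_locs_alt
  set l := PySem.List.enumerate (PySem.List.slice row (some 4) (some 15)) with hl
  rw [check_locs_go_eq]
  by_cases hall : l.all (fun p => !(p.2 == "1.0") || p.1 == 2 || p.1 == 5) = true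
  · rw [if_pos hall, if_pos ((flags_subset l).mpr hall)]
    simp only [Bool.false_or]
    have c2 : (PySem.Set.ofList ((l.filter (fun p => p.2 == "1.0")).map (·.1))).contains 2
        = l.any (fun p => p.1 == 2 && p.2 == "1.0") := by
      rw [Bool.eq_iff_iff, PySem.Set.contains_iff, flags_mem]
    have c5 : (PySem.Set.ofList ((l.filter (fun p => p.2 == "1.0")).map (·.1))).contains 5
        = l.any (fun p => p.1 == 5 && p.2 == "1.0") := by
      rw [Bool.eq_iff_iff, PySem.Set.contains_iff, flags_mem]
    rw [c2, c5]
  · rw [if_neg hall, if_neg (fun h => hall ((flags_subset l).mp h))]
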